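-- pv_equiv track=rewrite | github.com/algebraic-extension/2x2-Hill-Cipher-Brute-Force-Cracker | brute/nuts_and_bolts/matrix.py | alph
-- ===== SOURCE A (Python) =====
-- def alph(x):
-- 	"""Unlike the other functions containing the alphabet in use,
-- 	this is the only function that assigns non-negative integers back to
-- 	letters.
-- 	"""
--
-- 	alphabet = {
-- 		" ": 0,
-- 		"a": 1,
-- 		"b": 2,
-- 		"c": 3,
-- 		"d": 4,
-- 		"e": 5,
-- 		"f": 6,
-- 		"g": 7,
-- 		"h": 8,
-- 		"i": 9,
-- 		"j": 10,
-- 		"k": 11,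
-- 		"l": 12,
-- 		"m": 13,
-- 		"n": 14,
-- 		"o": 15,
-- 		"p": 16,
-- 		"q": 17,
-- 		"r": 18,
-- 		"s": 19,
-- 		"t": 20,
-- 		"u": 21,
-- 		"v": 22,
-- 		"w": 23,
-- 		"x": 24,
-- 		"y": 25,
-- 		"z": 26
-- 	}
--
-- 	for i in alphabet:
-- 		if alphabet[i] == x:
-- 			return i
-- 		else:
-- 			continue
-- ===== SOURCE B (Python) =====
-- ALPHABET = " abcdefghijklmnopqrstuvwxyz"
--
-- def alph(x):
--     """Map an in-range integer code back to its letter by direct string indexing; None otherwise."""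
--     if isinstance(x, int) and 0 <= x <= 26:
--         return ALPHABET[x]
--     return None
-- ===== Notes on version B (the rewrite author's own statement) =====
-- stated objective: idiomatic
-- what changed: Replaces the dict literal and linear key scan with a direct bounds-checked index into the alphabet string, where the character's position equals its code.
import Mathlib
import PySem

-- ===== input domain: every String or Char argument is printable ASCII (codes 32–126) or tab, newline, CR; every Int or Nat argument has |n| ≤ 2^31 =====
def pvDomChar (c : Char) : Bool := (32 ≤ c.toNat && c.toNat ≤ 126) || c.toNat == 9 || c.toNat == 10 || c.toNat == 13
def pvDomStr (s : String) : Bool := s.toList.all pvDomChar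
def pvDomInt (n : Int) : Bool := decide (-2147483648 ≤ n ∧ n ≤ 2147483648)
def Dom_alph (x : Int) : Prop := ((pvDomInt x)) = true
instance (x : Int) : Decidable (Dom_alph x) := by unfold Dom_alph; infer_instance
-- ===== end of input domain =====

-- B replaces A's 27-entry dict and linear scan with a direct bounds-checked index
-- into the string " abcdefghijklmnopqrstuvwxyz" (idiomatic; return value only).

-- ===== PORT A =====
-- A's dict literal as an association list in insertion order.
def alphPairs : List (String × Int) :=
  [(" ", 0), ("a", 1), ("b", 2), ("c", 3), ("d", 4), ("e", 5), ("f", 6), ("g", 7),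
   ("h", 8), ("i", 9), ("j", 10), ("k", 11), ("l", 12), ("m", 13), ("n", 14), ("o", 15),
   ("p", 16), ("q", 17), ("r", 18), ("s", 19), ("t", 20), ("u", 21), ("v", 22), ("w", 23),
   ("x", 24), ("y", 25), ("z", 26)]

-- the 'for i in alphabet: if alphabet[i] == x: return i' loop; falls off the end → none
def alphScan (ps : List (String × Int)) (x : Int) : Option String :=
  match ps with
  | [] => none
  | (k, v) :: rest => if v = x then some k else alphScan rest x

def alph (x : Int) : Option String := alphScan alphPairs x

-- ===== PORT B =====
def alphAlphabet : String := " abcdefghijklmnopqrstuvwxyz"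

def alph_alt (x : Int) : Option String :=
  if 0 ≤ x ∧ x ≤ 26 then
    (PySem.Str.pyGet? alphAlphabet x).map (fun c => String.ofList [c])  -- ALPHABET[x] (1-char string)
  else none

-- ===== PRECONDITION & SPEC =====
def Spec_alph (x : Int) (out : Option String) : Prop := out = alph_alt x
instance (x : Int) (out : Option String) : Decidable (Spec_alph x out) := by unfold Spec_alph; infer_instance

-- ===== CLAIM (what is proved, stated in full; the proofs are below) =====
def Claim_equal_alph : Prop := ∀ (x : Int), Dom_alph x → Spec_alph x (alph x)

-- ===== LEMMAS AND PROOFS =====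

-- ===== VERDICT (by name: the statement is the Claim_ definition above) =====
theorem alphScan_none (ps : List (String × Int)) (x : Int)
    (h : ∀ p ∈ ps, p.2 ≠ x) : alphScan ps x = none := by
  induction ps with
  | nil => rfl
  | cons p rest ih =>
    obtain ⟨k, v⟩ := p
    simp only [alphScan]
    rw [if_neg (h (k, v) (List.mem_cons_self))]
    exact ih fun q hq => h q (List.mem_cons_of_mem _ hq)

theorem alph_spec : Claim_equal_alph := by
  intro x _
  unfold Spec_alph
  by_cases h : 0 ≤ x ∧ x ≤ 26
  · obtain ⟨h1, h2⟩ := h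
    interval_cases x <;> rfl
  · rw [show alph_alt x = none by simp [alph_alt, h]]
    exact alphScan_none _ x (by intro p hp; fin_cases hp <;> simp <;> omega)
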